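-- pv_equiv track=rewrite | github.com/macelik/MoSwA | build/PlotHotClusters.py | plotit
-- ===== SOURCE A (Python) =====
-- def plotit(r_cluster,kmer):
--     plotin={}
--     a=list(r_cluster.keys())
--     for r in r_cluster:
--         get_index_pos=a.index(r)
--         if get_index_pos + 1 == len(a):
--             Cs=r_cluster[r][-1][-1] - r_cluster[r][0][0] + kmer
--             Cmsp=len(r_cluster[r])+1
--             start,end=r_cluster[r][0][0],r_cluster[r][-1][-1]
--             plotin[r]={'Cmsp':Cmsp,'Cs':Cs,'Dist':None,'Start':start,'End':end}
--
--         else: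
--             get_next_cluster=a[get_index_pos+1]
--             Cs=r_cluster[r][-1][-1] - r_cluster[r][0][0] + kmer
--             Cmsp=len(r_cluster[r])+1
--             dist= abs(r_cluster[get_next_cluster][0][0] - r_cluster[r][-1][-1])
--             start,end=r_cluster[r][0][0],r_cluster[r][-1][-1]
--             plotin[r]={'Cmsp':Cmsp,'Cs':Cs,'Dist':dist,'Start':start,'End':end}
--     return plotin
-- ===== SOURCE B (Python) =====
-- def plotit(r_cluster, kmer):
--     # One backwards pass carrying the next cluster's hit list: O(n) total,
--     # no list.index scan and no key lookups.
--     out = []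
--     nxt = None
--     for r, v in reversed(list(r_cluster.items())):
--         start, end = v[0][0], v[-1][-1]
--         dist = None if nxt is None else abs(nxt[0][0] - end)
--         out.append((r, {'Cmsp': len(v) + 1, 'Cs': end - start + kmer,
--                         'Dist': dist, 'Start': start, 'End': end}))
--         nxt = v
--     return dict(reversed(out))
-- ===== Notes on version B (the rewrite author's own statement) =====
-- stated objective: faster
-- what changed: Replaces the per-key a.index() scan plus next-key dict lookups with a single backwards pass that carries the following cluster's hit list, building the entries back-to-front.
-- outside the precondition, e.g. on plotit({'a': []}, 0): A raises IndexError, B raises IndexError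
import Mathlib
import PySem

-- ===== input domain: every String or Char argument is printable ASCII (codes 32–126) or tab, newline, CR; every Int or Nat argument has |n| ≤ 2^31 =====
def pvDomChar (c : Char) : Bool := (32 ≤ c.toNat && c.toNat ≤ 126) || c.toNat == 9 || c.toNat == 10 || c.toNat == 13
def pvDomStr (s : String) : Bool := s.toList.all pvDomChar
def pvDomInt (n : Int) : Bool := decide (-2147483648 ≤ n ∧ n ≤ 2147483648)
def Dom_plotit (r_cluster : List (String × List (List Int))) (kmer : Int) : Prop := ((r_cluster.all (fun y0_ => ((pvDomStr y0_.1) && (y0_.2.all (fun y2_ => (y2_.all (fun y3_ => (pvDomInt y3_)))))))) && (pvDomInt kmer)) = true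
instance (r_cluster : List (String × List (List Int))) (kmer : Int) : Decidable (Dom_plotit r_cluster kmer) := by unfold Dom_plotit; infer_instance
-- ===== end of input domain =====

-- B replaces A's per-key a.index() scan and next-key lookups by one backwards pass
-- carrying the following cluster's hit list (entries built back-to-front): O(n) vs O(n^2).

-- ===== PORT A =====
-- the body of A's loop for key r: index of r in the key list, branch on "last key",
-- r_cluster[...] lookups are first-match dict lookups
def plotitEntryA (r_cluster : List (String × List (List Int))) (kmer : Int) (r : String) :
    List (String × Option Int) :=
  let d := PySem.Dict.mk r_cluster
  let a := r_cluster.map Prod.fst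
  let gi := (PySem.List.index? a r).getD 0
  let v := (d.get? r).getD []
  let start := PySem.List.pyGetD (PySem.List.pyGetD v 0 []) 0 0
  let e := PySem.List.pyGetD (PySem.List.pyGetD v (-1) []) (-1) 0
  let Cs := e - start + kmer
  let Cmsp := (v.length : Int) + 1
  if gi + 1 = a.length then
    [("Cmsp", some Cmsp), ("Cs", some Cs), ("Dist", none), ("Start", some start), ("End", some e)]
  else
    let nxt := PySem.List.pyGetD a ((gi : Int) + 1) ""
    let nv := (d.get? nxt).getD []
    let dist := |PySem.List.pyGetD (PySem.List.pyGetD nv 0 []) 0 0 - e|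
    [("Cmsp", some Cmsp), ("Cs", some Cs), ("Dist", some dist), ("Start", some start), ("End", some e)]

def plotit (r_cluster : List (String × List (List Int))) (kmer : Int) :
    List (String × List (String × Option Int)) :=
  (r_cluster.foldl
    (fun (plotin : PySem.Dict String (List (String × Option Int))) p =>
      plotin.insert p.1 (plotitEntryA r_cluster kmer p.1))
    PySem.Dict.empty).items

-- ===== PORT B =====
-- loop body of B's backwards pass: state = (out list so far, hit list of the next cluster)
def plotitStepB (kmer : Int)
    (st : List (String × List (String × Option Int)) × Option (List (List Int)))
    (p : String × List (List Int)) :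
    List (String × List (String × Option Int)) × Option (List (List Int)) :=
  let v := p.2
  let start := PySem.List.pyGetD (PySem.List.pyGetD v 0 []) 0 0
  let e := PySem.List.pyGetD (PySem.List.pyGetD v (-1) []) (-1) 0
  let dist : Option Int := match st.2 with
    | none => none
    | some nv => some |PySem.List.pyGetD (PySem.List.pyGetD nv 0 []) 0 0 - e|
  (st.1 ++ [(p.1, [("Cmsp", some ((v.length : Int) + 1)), ("Cs", some (e - start + kmer)),
                   ("Dist", dist), ("Start", some start), ("End", some e)])],
   some v)

def plotit_alt (r_cluster : List (String × List (List Int))) (kmer : Int) :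
    List (String × List (String × Option Int)) :=
  (r_cluster.reverse.foldl (plotitStepB kmer) ([], none)).1.reverse

-- ===== PRECONDITION & SPEC =====
-- Pre_ excludes inputs on which A raises IndexError (a cluster whose hit list, or whose
-- first or last hit, is empty) and association lists with duplicate keys, which do not
-- represent a Python dict (the dict literal silently collapses them).
def Pre_plotit (r_cluster : List (String × List (List Int))) (kmer : Int) : Prop :=
  (r_cluster.map Prod.fst).Nodup ∧
  ∀ p ∈ r_cluster, p.2 ≠ [] ∧ p.2.headD [] ≠ [] ∧ p.2.getLastD [] ≠ []
instance (r_cluster : List (String × List (List Int))) (kmer : Int) : Decidable (Pre_plotit r_cluster kmer) := by unfold Pre_plotit; infer_instance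

def pvWitness_plotit : (List (String × List (List Int))) × Int :=
  ([("a", [[1, 4], [7, 9]]), ("b", [[20, 25]])], 3)

def Spec_plotit (r_cluster : List (String × List (List Int))) (kmer : Int) (out : List (String × List (String × Option Int))) : Prop := out = plotit_alt r_cluster kmer
instance (r_cluster : List (String × List (List Int))) (kmer : Int) (out : List (String × List (String × Option Int))) : Decidable (Spec_plotit r_cluster kmer out) := by unfold Spec_plotit; infer_instance

-- ===== CLAIM (what is proved, stated in full; the proofs are below) =====
def Claim_equal_plotit : Prop := ∀ (r_cluster : List (String × List (List Int))) (kmer : Int), Dom_plotit r_cluster kmer → Pre_plotit r_cluster kmer → Spec_plotit r_cluster kmer (plotit r_cluster kmer)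

-- ===== LEMMAS AND PROOFS =====

-- proof-side: the output entry for cluster p when the following cluster's hits are nn
def pvEntry (kmer : Int) (p : String × List (List Int)) (nn : Option (List (List Int))) :
    String × List (String × Option Int) :=
  let v := p.2
  let start := PySem.List.pyGetD (PySem.List.pyGetD v 0 []) 0 0
  let e := PySem.List.pyGetD (PySem.List.pyGetD v (-1) []) (-1) 0
  let dist : Option Int := match nn with
    | none => none
    | some nv => some |PySem.List.pyGetD (PySem.List.pyGetD nv 0 []) 0 0 - e|
  (p.1, [("Cmsp", some ((v.length : Int) + 1)), ("Cs", some (e - start + kmer)),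
         ("Dist", dist), ("Start", some start), ("End", some e)])

-- proof-side canonical form: forward recursion, n = hits following the whole list
def pvGo (kmer : Int) : List (String × List (List Int)) → Option (List (List Int)) →
    List (String × List (String × Option Int))
  | [], _ => []
  | p :: rest, n =>
      pvEntry kmer p (match rest with | [] => n | q :: _ => some q.2) :: pvGo kmer rest n

def pvLastV : List (String × List (List Int)) → Option (List (List Int)) → Option (List (List Int))
  | [], n => n
  | p :: t, _ => pvLastV t (some p.2)

theorem pvStepB_eq (kmer : Int) (acc : List (String × List (String × Option Int)))
    (n : Option (List (List Int))) (p : String × List (List Int)) :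
    plotitStepB kmer (acc, n) p = (acc ++ [pvEntry kmer p n], some p.2) := by
  cases n <;> rfl

theorem pvGo_append (kmer : Int) (l : List (String × List (List Int)))
    (x : String × List (List Int)) (n : Option (List (List Int))) :
    pvGo kmer (l ++ [x]) n = pvGo kmer l (some x.2) ++ [pvEntry kmer x n] := by
  induction l with
  | nil => rfl
  | cons y t ih =>
      cases t with
      | nil => rfl
      | cons z t' =>
          have hstep : pvGo kmer ((y :: z :: t') ++ [x]) n =
              pvEntry kmer y (some z.2) :: pvGo kmer ((z :: t') ++ [x]) n := rfl
          rw [hstep, ih]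
          rfl

theorem pvFoldB (kmer : Int) (m : List (String × List (List Int)))
    (acc : List (String × List (String × Option Int))) (n : Option (List (List Int))) :
    m.foldl (plotitStepB kmer) (acc, n) =
      (acc ++ (pvGo kmer m.reverse n).reverse, pvLastV m n) := by
  induction m generalizing acc n with
  | nil => simp [pvGo, pvLastV]
  | cons p m' ih =>
      simp only [List.foldl_cons, pvStepB_eq, ih, pvLastV, List.reverse_cons, pvGo_append]
      simp

theorem pv_alt_eq_go (rc : List (String × List (List Int))) (kmer : Int) :
    plotit_alt rc kmer = pvGo kmer rc none := by
  unfold plotit_alt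
  rw [pvFoldB]
  simp

-- A's fold appends one fresh entry per key
theorem pvFoldA (rc : List (String × List (List Int))) (kmer : Int)
    (s : List (String × List (List Int)))
    (plotin : PySem.Dict String (List (String × Option Int)))
    (hnd : (s.map Prod.fst).Nodup)
    (hfresh : ∀ p ∈ s, plotin.contains p.1 = false) :
    (s.foldl (fun acc p => acc.insert p.1 (plotitEntryA rc kmer p.1)) plotin).items =
      plotin.items ++ s.map (fun p => (p.1, plotitEntryA rc kmer p.1)) := by
  induction s generalizing plotin with
  | nil => simp
  | cons p t ih =>
      simp only [List.foldl_cons]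
      rw [ih]
      · rw [PySem.Dict.items_insert_of_not_contains]
        · simp
        · exact hfresh p (by simp)
      · exact (List.nodup_cons.mp hnd).2
      · intro q hq
        rw [PySem.Dict.contains_insert]
        have hne : q.1 ≠ p.1 := by
          intro h
          exact (List.nodup_cons.mp hnd).1 (h ▸ List.mem_map_of_mem hq)
        simp [hne, hfresh q (List.mem_cons_of_mem _ hq)]

theorem pv_get_of_mem (rc : List (String × List (List Int)))
    (hnd : (rc.map Prod.fst).Nodup) (p : String × List (List Int)) (hp : p ∈ rc) :
    (PySem.Dict.mk rc).get? p.1 = some p.2 := by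
  exact PySem.Dict.get?_of_mem_items (d := PySem.Dict.mk rc) (by simpa using hp) (by simpa using hnd)

-- pointwise: on a suffix of rc, A's entry agrees with the canonical entry
theorem pvMap_eq_go (rc : List (String × List (List Int))) (kmer : Int)
    (hnd : (rc.map Prod.fst).Nodup) :
    ∀ suf pre, rc = pre ++ suf →
      suf.map (fun p => (p.1, plotitEntryA rc kmer p.1)) = pvGo kmer suf none := by
  intro suf
  induction suf with
  | nil => intro pre h; rfl
  | cons p rest ih =>
      intro pre h
      have hmem : p ∈ rc := by rw [h]; simp
      have hnotpre : p.1 ∉ pre.map Prod.fst := by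
        have := hnd
        rw [h] at this
        simp only [List.map_append, List.nodup_append] at this
        intro hc
        exact this.2.2 _ hc _ (by simp) rfl
      have hidx : PySem.List.index? (rc.map Prod.fst) p.1 = some pre.length := by
        rw [PySem.List.index?_eq_some_iff]
        exact ⟨pre.map Prod.fst, rest.map Prod.fst, by rw [h]; simp, by simp, hnotpre⟩
      have hget : (PySem.Dict.mk rc).get? p.1 = some p.2 := pv_get_of_mem rc hnd p hmem
      have hlen : rc.length = pre.length + 1 + rest.length := by rw [h]; simp; omega
      simp only [List.map_cons, pvGo]
      congr 1
      · -- head entry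
        cases rest with
        | nil =>
            have hbranch : pre.length + 1 = (rc.map Prod.fst).length := by simp [hlen]
            simp only [plotitEntryA, pvEntry, hidx, hget, Option.getD_some, if_pos hbranch]
        | cons q rest' =>
            have hbranch : ¬ (pre.length + 1 = (rc.map Prod.fst).length) := by
              simp [hlen]
            have hnxt : PySem.List.pyGetD (rc.map Prod.fst) ((pre.length : Int) + 1) "" = q.1 := by
              have : ((pre.length : Int) + 1) = ((pre.length + 1 : Nat) : Int) := by push_cast; ring
              rw [this, PySem.List.pyGetD_natCast]
              rw [h]
              rw [List.getD_eq_getElem?_getD]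
              rw [show pre ++ p :: q :: rest' = (pre ++ [p]) ++ q :: rest' by simp]
              rw [List.map_append, List.getElem?_append_right (by simp)]
              simp
            have hgetq : (PySem.Dict.mk rc).get? q.1 = some q.2 :=
              pv_get_of_mem rc hnd q (by rw [h]; simp)
            simp only [plotitEntryA, pvEntry, hidx, hget, Option.getD_some, if_neg hbranch,
              hnxt, hgetq]
      · exact ih (pre ++ [p]) (by rw [h]; simp)

-- ===== VERDICT (by name: the statement is the Claim_ definition above) =====
theorem plotit_spec : Claim_equal_plotit := by
  intro rc kmer _ hpre
  unfold Spec_plotit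
  unfold plotit
  rw [pvFoldA rc kmer rc PySem.Dict.empty hpre.1 (by intro p _; simp [PySem.Dict.contains_empty])]
  rw [pv_alt_eq_go]
  have := pvMap_eq_go rc kmer hpre.1 rc [] (by simp)
  simpa using this
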